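-- pv_equiv track=rewrite | github.com/fasiluva/Reversi | python/jugadas.py | cantVolteosVertical
-- ===== SOURCE A (Python) =====
-- def cantVolteosVertical(ficha, fichasJugador, fichasMaquina):
--
--     # cantVolteosDiagonalSup :: (int, int) set((int, int)) set((int, int)) -> int
--     # Recibe la ficha ingresada, las fichas del jugador y de la maquina y devuelve la cantidad
--     # de fichas que voltea verticalmente del jugador.
--
--     contadorFila = ficha[1] - 1
--     contadorVolteosSuperior = 0
--     contadorVolteosInferior = 0
--
--     while contadorFila >= 1 and (ficha[0], contadorFila) in fichasJugador: # Cuenta hacia arriba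
--
--         contadorVolteosSuperior += 1
--
--         if not ocupada((ficha[0], contadorFila - 1), fichasJugador, fichasMaquina):
--             # Si la ficha siguiente a la que se esta evaluando esta vacia, no realiza ningun cambio.
--             contadorVolteosSuperior = 0
--
--         contadorFila -= 1
--
--
--     contadorFila = ficha[1] + 1
--
--     while contadorFila <= 8 and (ficha[0], contadorFila) in fichasJugador: # Cuenta hacia abajo
--
--         contadorVolteosInferior += 1
--
--         if not ocupada((ficha[0], contadorFila + 1), fichasJugador, fichasMaquina):
--             # Si la ficha siguiente a la que se esta evaluando esta vacia, no realiza ningun cambio.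
--             contadorVolteosInferior = 0
--
--         contadorFila += 1
--
--
--     return contadorVolteosInferior + contadorVolteosSuperior
--
-- def ocupada(fichaVerifica, jugador, maquina):
--
--     # ocupada :: (int, int) set((int, int)) set((int, int)) -> bool
--     # Chequea que la ficha no este ocupada por ninguno de los 2 jugadores.
--
--     return (fichaVerifica in jugador) or (fichaVerifica in maquina)
-- ===== SOURCE B (Python) =====
-- def ocupada(fichaVerifica, jugador, maquina):
--     return (fichaVerifica in jugador) or (fichaVerifica in maquina)
--
-- def _volteosDireccion(col, fila, candidatas, paso, fichasJugador, fichasMaquina):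
--     # candidatas: the player's rows in this column on this side, sorted outward
--     # from fila. Count how long they stay consecutive, then one occupancy check
--     # at the first row past that run.
--     n = 0
--     for r in candidatas:
--         if r != fila + paso * (n + 1):
--             break
--         n += 1
--     if n and ocupada((col, fila + paso * (n + 1)), fichasJugador, fichasMaquina):
--         return n
--     return 0
--
-- def cantVolteosVertical(ficha, fichasJugador, fichasMaquina):
--     col, fila = ficha
--     propias = {r for (c, r) in fichasJugador if c == col}
--     arriba = sorted((r for r in propias if 1 <= r <= fila - 1), reverse=True)
--     abajo = sorted(r for r in propias if fila + 1 <= r <= 8)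
--     return (_volteosDireccion(col, fila, arriba, -1, fichasJugador, fichasMaquina)
--             + _volteosDireccion(col, fila, abajo, 1, fichasJugador, fichasMaquina))
-- ===== Notes on version B (the rewrite author's own statement) =====
-- stated objective: alternative
-- what changed: Instead of walking the board cell by cell with a counter that resets on an empty neighbour, B indexes the player's rows of the move's column into a set once, sorts each side's rows outward from the move, counts the consecutive prefix of that sorted list, and makes a single occupancy check at the first row past the run.
import Mathlib
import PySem

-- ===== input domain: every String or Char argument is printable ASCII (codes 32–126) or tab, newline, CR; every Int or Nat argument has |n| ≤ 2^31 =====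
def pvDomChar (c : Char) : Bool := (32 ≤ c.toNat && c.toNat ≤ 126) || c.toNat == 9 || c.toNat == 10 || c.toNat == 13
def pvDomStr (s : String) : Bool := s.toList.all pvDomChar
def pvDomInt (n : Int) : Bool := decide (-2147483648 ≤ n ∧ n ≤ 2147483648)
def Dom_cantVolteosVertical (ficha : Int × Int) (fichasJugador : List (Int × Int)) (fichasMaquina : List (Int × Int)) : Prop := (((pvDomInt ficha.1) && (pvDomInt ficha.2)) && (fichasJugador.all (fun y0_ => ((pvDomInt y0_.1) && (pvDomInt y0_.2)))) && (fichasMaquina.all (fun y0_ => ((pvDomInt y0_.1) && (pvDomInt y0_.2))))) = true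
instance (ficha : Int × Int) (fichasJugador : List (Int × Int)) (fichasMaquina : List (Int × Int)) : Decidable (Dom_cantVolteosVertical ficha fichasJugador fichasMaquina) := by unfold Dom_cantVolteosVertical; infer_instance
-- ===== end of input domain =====

-- B replaces A's cell-by-cell board walk (counter with in-loop occupancy reset) by indexing
-- the player's rows of the move's column into a set, sorting each side's rows outward from
-- the move, counting the consecutive prefix of that list, and one occupancy check past it.

-- ===== PORT A =====
def ocupadaA (fichaVerifica : Int × Int) (jugador maquina : List (Int × Int)) : Bool :=
  decide (fichaVerifica ∈ jugador) || decide (fichaVerifica ∈ maquina)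

-- A's upward while-loop: contadorFila = r, counter c
def loopSupA (x : Int) (r : Int) (c : Int) (j m : List (Int × Int)) : Int :=
  if h : 1 ≤ r ∧ (x, r) ∈ j then
    loopSupA x (r - 1) (if ¬ ocupadaA (x, r - 1) j m then 0 else c + 1) j m
  else c
termination_by r.toNat
decreasing_by omega

-- A's downward while-loop
def loopInfA (x : Int) (r : Int) (c : Int) (j m : List (Int × Int)) : Int :=
  if h : r ≤ 8 ∧ (x, r) ∈ j then
    loopInfA x (r + 1) (if ¬ ocupadaA (x, r + 1) j m then 0 else c + 1) j m
  else c
termination_by (9 - r).toNat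
decreasing_by omega

def cantVolteosVertical (ficha : Int × Int) (fichasJugador : List (Int × Int)) (fichasMaquina : List (Int × Int)) : Int :=
  let sup := loopSupA ficha.1 (ficha.2 - 1) 0 fichasJugador fichasMaquina
  let inf := loopInfA ficha.1 (ficha.2 + 1) 0 fichasJugador fichasMaquina
  inf + sup

-- ===== PORT B =====
def ocupadaB (fichaVerifica : Int × Int) (jugador maquina : List (Int × Int)) : Bool :=
  decide (fichaVerifica ∈ jugador) || decide (fichaVerifica ∈ maquina)

-- Source B's inner for-loop: count the consecutive prefix of candidatas
def countRunB (candidatas : List Int) (fila paso : Int) (n : Int) : Int :=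
  match candidatas with
  | [] => n
  | r :: rest => if r ≠ fila + paso * (n + 1) then n else countRunB rest fila paso (n + 1)

def volteosDireccionB (col fila : Int) (candidatas : List Int) (paso : Int)
    (fichasJugador fichasMaquina : List (Int × Int)) : Int :=
  let n := countRunB candidatas fila paso 0
  if n ≠ 0 ∧ ocupadaB (col, fila + paso * (n + 1)) fichasJugador fichasMaquina then n else 0

def cantVolteosVertical_alt (ficha : Int × Int) (fichasJugador : List (Int × Int)) (fichasMaquina : List (Int × Int)) : Int :=
  let col := ficha.1
  let fila := ficha.2
  let propias : PySem.Set Int :=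
    PySem.Set.ofList ((fichasJugador.filter (fun p => p.1 == col)).map Prod.snd)
  let arriba := PySem.List.sorted (propias.filter (fun r => decide (1 ≤ r) && decide (r ≤ fila - 1))) (fun x => x) true
  let abajo := PySem.List.sorted (propias.filter (fun r => decide (fila + 1 ≤ r) && decide (r ≤ 8))) (fun x => x) false
  volteosDireccionB col fila arriba (-1) fichasJugador fichasMaquina
    + volteosDireccionB col fila abajo 1 fichasJugador fichasMaquina

-- ===== PRECONDITION & SPEC =====
def Spec_cantVolteosVertical (ficha : Int × Int) (fichasJugador : List (Int × Int)) (fichasMaquina : List (Int × Int)) (out : Int) : Prop := out = cantVolteosVertical_alt ficha fichasJugador fichasMaquina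
instance (ficha : Int × Int) (fichasJugador : List (Int × Int)) (fichasMaquina : List (Int × Int)) (out : Int) : Decidable (Spec_cantVolteosVertical ficha fichasJugador fichasMaquina out) := by unfold Spec_cantVolteosVertical; infer_instance

-- ===== CLAIM (what is proved, stated in full; the proofs are below) =====
def Claim_equal_cantVolteosVertical : Prop := ∀ (ficha : Int × Int) (fichasJugador : List (Int × Int)) (fichasMaquina : List (Int × Int)), Dom_cantVolteosVertical ficha fichasJugador fichasMaquina → Spec_cantVolteosVertical ficha fichasJugador fichasMaquina (cantVolteosVertical ficha fichasJugador fichasMaquina)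

-- ===== LEMMAS AND PROOFS =====

-- canonical run length above the move: consecutive player rows t, t-1, … (≥ 1)
def runUp (x t : Int) (j : List (Int × Int)) : Int :=
  if h : 1 ≤ t ∧ (x, t) ∈ j then runUp x (t - 1) j + 1 else 0
termination_by t.toNat
decreasing_by omega

-- canonical run length below the move: consecutive player rows t, t+1, … (≤ 8)
def runDown (x t : Int) (j : List (Int × Int)) : Int :=
  if h : t ≤ 8 ∧ (x, t) ∈ j then runDown x (t + 1) j + 1 else 0
termination_by (9 - t).toNat
decreasing_by omega

theorem runUp_nonneg (x t : Int) (j : List (Int × Int)) : 0 ≤ runUp x t j := by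
  induction t using runUp.induct x (j := j) with
  | case1 t h ih => rw [runUp, dif_pos h]; omega
  | case2 t h => rw [runUp, dif_neg h]

theorem runDown_nonneg (x t : Int) (j : List (Int × Int)) : 0 ≤ runDown x t j := by
  induction t using runDown.induct x (j := j) with
  | case1 t h ih => rw [runDown, dif_pos h]; omega
  | case2 t h => rw [runDown, dif_neg h]

theorem loopSupA_eq (x : Int) (j m : List (Int × Int)) :
    ∀ r c, (c = 0 ∨ (0 ≤ r ∧ ocupadaA (x, r) j m = true)) →
      loopSupA x r c j m =
        if ocupadaA (x, r - runUp x r j) j m then c + runUp x r j else 0 := by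
  intro r c H
  induction r, c using loopSupA.induct x (j := j) (m := m) with
  | case1 r c h ih =>
    obtain ⟨hr, hmem⟩ := h
    rw [loopSupA, dif_pos ⟨hr, hmem⟩]
    rw [runUp, dif_pos ⟨hr, hmem⟩]
    have hb : r - (runUp x (r - 1) j + 1) = (r - 1) - runUp x (r - 1) j := by ring
    rw [hb]
    simp only [dite_eq_ite] at ih
    by_cases hoc : ocupadaA (x, r - 1) j m = true
    · have ih' := ih (Or.inr ⟨by omega, hoc⟩)
      rw [if_neg (not_not_intro hoc)] at ih' ⊢
      rw [ih']
      split <;> omega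
    · have hnj : (x, r - 1) ∉ j := by
        intro hmem'; exact hoc (by simp [ocupadaA, hmem'])
      have hu : runUp x (r - 1) j = 0 := by
        rw [runUp, dif_neg]; intro hc; exact hnj hc.2
      have ih' := ih (Or.inl (if_pos hoc))
      rw [if_pos hoc] at ih' ⊢
      rw [ih', hu]
      simp [hoc]
  | case2 r c h =>
    rw [loopSupA, dif_neg h]
    rw [runUp, dif_neg h]
    simp only [add_zero, sub_zero]
    rcases H with rfl | ⟨_, hoc⟩
    · simp
    · simp [hoc]

theorem loopInfA_eq (x : Int) (j m : List (Int × Int)) :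
    ∀ r c, (c = 0 ∨ (r ≤ 9 ∧ ocupadaA (x, r) j m = true)) →
      loopInfA x r c j m =
        if ocupadaA (x, r + runDown x r j) j m then c + runDown x r j else 0 := by
  intro r c H
  induction r, c using loopInfA.induct x (j := j) (m := m) with
  | case1 r c h ih =>
    obtain ⟨hr, hmem⟩ := h
    rw [loopInfA, dif_pos ⟨hr, hmem⟩]
    rw [runDown, dif_pos ⟨hr, hmem⟩]
    have hb : r + (runDown x (r + 1) j + 1) = (r + 1) + runDown x (r + 1) j := by ring
    rw [hb]
    simp only [dite_eq_ite] at ih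
    by_cases hoc : ocupadaA (x, r + 1) j m = true
    · have ih' := ih (Or.inr ⟨by omega, hoc⟩)
      rw [if_neg (not_not_intro hoc)] at ih' ⊢
      rw [ih']
      split <;> omega
    · have hnj : (x, r + 1) ∉ j := by
        intro hmem'; exact hoc (by simp [ocupadaA, hmem'])
      have hu : runDown x (r + 1) j = 0 := by
        rw [runDown, dif_neg]; intro hc; exact hnj hc.2
      have ih' := ih (Or.inl (if_pos hoc))
      rw [if_pos hoc] at ih' ⊢
      rw [ih', hu]
      simp [hoc]
  | case2 r c h =>
    rw [loopInfA, dif_neg h]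
    rw [runDown, dif_neg h]
    simp only [add_zero]
    rcases H with rfl | ⟨_, hoc⟩
    · simp
    · simp [hoc]

-- B's prefix count on a strictly-descending list of exactly the player rows in [1, t]
theorem countRunB_up (x : Int) (j : List (Int × Int)) :
    ∀ (L : List Int) (t n fila : Int), L.Pairwise (· > ·) →
      (∀ r : Int, r ∈ L ↔ (1 ≤ r ∧ r ≤ t ∧ (x, r) ∈ j)) →
      fila + (-1) * (n + 1) = t →
      countRunB L fila (-1) n = n + runUp x t j := by
  intro L
  induction L with
  | nil =>
    intro t n fila _ hmem _
    have hu : runUp x t j = 0 := by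
      rw [runUp, dif_neg]
      intro hc
      exact (List.not_mem_nil (a := t)).elim ((hmem t).mpr ⟨hc.1, le_refl t, hc.2⟩)
    simp [countRunB, hu]
  | cons r rest ih =>
    intro t n fila hpw hmem hfil
    have hrL := (hmem r).mp (List.mem_cons_self ..)
    have hgt : ∀ s ∈ rest, r > s := fun s hs => (List.pairwise_cons.mp hpw).1 s hs
    by_cases hrt : r = t
    · subst hrt
      rw [countRunB, if_neg (by omega)]
      have hmem' : ∀ s : Int, s ∈ rest ↔ (1 ≤ s ∧ s ≤ r - 1 ∧ (x, s) ∈ j) := by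
        intro s
        constructor
        · intro hs
          have := (hmem s).mp (List.mem_cons_of_mem _ hs)
          exact ⟨this.1, by have := hgt s hs; omega, this.2.2⟩
        · intro ⟨h1, h2, h3⟩
          rcases List.mem_cons.mp ((hmem s).mpr ⟨h1, by omega, h3⟩) with h | h
          · omega
          · exact h
      rw [ih (r - 1) (n + 1) fila (List.pairwise_cons.mp hpw).2 hmem' (by omega)]
      have hru : runUp x r j = runUp x (r - 1) j + 1 := by
        rw [runUp, dif_pos ⟨hrL.1, hrL.2.2⟩]
      rw [hru]; ring
    · rw [countRunB, if_pos (by omega)]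
      have hu : runUp x t j = 0 := by
        rw [runUp, dif_neg]
        intro hc
        rcases List.mem_cons.mp ((hmem t).mpr ⟨hc.1, le_refl t, hc.2⟩) with h | h
        · exact hrt h.symm
        · have := hgt t h; omega
      rw [hu]; ring

-- B's prefix count on a strictly-ascending list of exactly the player rows in [t, 8]
theorem countRunB_down (x : Int) (j : List (Int × Int)) :
    ∀ (L : List Int) (t n fila : Int), L.Pairwise (· < ·) →
      (∀ r : Int, r ∈ L ↔ (t ≤ r ∧ r ≤ 8 ∧ (x, r) ∈ j)) →
      fila + 1 * (n + 1) = t →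
      countRunB L fila 1 n = n + runDown x t j := by
  intro L
  induction L with
  | nil =>
    intro t n fila _ hmem _
    have hu : runDown x t j = 0 := by
      rw [runDown, dif_neg]
      intro hc
      exact (List.not_mem_nil (a := t)).elim ((hmem t).mpr ⟨le_refl t, hc.1, hc.2⟩)
    simp [countRunB, hu]
  | cons r rest ih =>
    intro t n fila hpw hmem hfil
    have hrL := (hmem r).mp (List.mem_cons_self ..)
    have hlt : ∀ s ∈ rest, r < s := fun s hs => (List.pairwise_cons.mp hpw).1 s hs
    by_cases hrt : r = t
    · subst hrt
      rw [countRunB, if_neg (by omega)]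
      have hmem' : ∀ s : Int, s ∈ rest ↔ (r + 1 ≤ s ∧ s ≤ 8 ∧ (x, s) ∈ j) := by
        intro s
        constructor
        · intro hs
          have := (hmem s).mp (List.mem_cons_of_mem _ hs)
          exact ⟨by have := hlt s hs; omega, this.2.1, this.2.2⟩
        · intro ⟨h1, h2, h3⟩
          rcases List.mem_cons.mp ((hmem s).mpr ⟨by omega, h2, h3⟩) with h | h
          · omega
          · exact h
      rw [ih (r + 1) (n + 1) fila (List.pairwise_cons.mp hpw).2 hmem' (by omega)]
      have hru : runDown x r j = runDown x (r + 1) j + 1 := by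
        rw [runDown, dif_pos ⟨hrL.2.1, hrL.2.2⟩]
      rw [hru]; ring
    · rw [countRunB, if_pos (by omega)]
      have hu : runDown x t j = 0 := by
        rw [runDown, dif_neg]
        intro hc
        rcases List.mem_cons.mp ((hmem t).mpr ⟨le_refl t, hc.1, hc.2⟩) with h | h
        · exact hrt h.symm
        · have := hlt t h; omega
      rw [hu]; ring

-- membership in the column row-index: r is a player row of column x
theorem mem_propias (x : Int) (j : List (Int × Int)) (r : Int) :
    r ∈ PySem.Set.ofList ((j.filter (fun p => p.1 == x)).map Prod.snd) ↔ (x, r) ∈ j := by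
  rw [PySem.Set.mem_ofList]
  simp only [List.mem_map, List.mem_filter, beq_iff_eq]
  constructor
  · rintro ⟨⟨a, b⟩, ⟨hj, hc⟩, hr⟩
    simp only at hc hr
    subst hc; subst hr; exact hj
  · intro hj; exact ⟨(x, r), ⟨hj, rfl⟩, rfl⟩

theorem pairwise_gt_of_ge_nodup (L : List Int)
    (h1 : L.Pairwise (fun a b => b ≤ a)) (h2 : L.Nodup) : L.Pairwise (· > ·) :=
  (h1.and h2).imp (fun h => by omega)

theorem pairwise_lt_of_le_nodup (L : List Int)
    (h1 : L.Pairwise (fun a b => a ≤ b)) (h2 : L.Nodup) : L.Pairwise (· < ·) :=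
  (h1.and h2).imp (fun h => by omega)

-- ===== VERDICT (by name: the statement is the Claim_ definition above) =====
theorem cantVolteosVertical_spec : Claim_equal_cantVolteosVertical := by
  intro ficha j m _
  obtain ⟨x, fila⟩ := ficha
  unfold Spec_cantVolteosVertical cantVolteosVertical cantVolteosVertical_alt volteosDireccionB
  dsimp only
  set propias := PySem.Set.ofList ((j.filter (fun p => p.1 == x)).map Prod.snd) with hprop
  have hnodup : propias.Nodup := PySem.Set.nodup_ofList _
  -- up direction
  set Lup := PySem.List.sorted (propias.filter (fun r => decide (1 ≤ r) && decide (r ≤ fila - 1))) (fun x => x) true with hLup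
  have hup_pw : Lup.Pairwise (· > ·) := by
    apply pairwise_gt_of_ge_nodup
    · exact PySem.List.sorted_pairwise_rev ..
    · exact ((PySem.List.sorted_perm ..).nodup_iff).mpr (hnodup.filter _)
  have hup_mem : ∀ r : Int, r ∈ Lup ↔ (1 ≤ r ∧ r ≤ fila - 1 ∧ (x, r) ∈ j) := by
    intro r
    rw [hLup, PySem.List.mem_sorted, List.mem_filter, hprop, mem_propias]
    simp only [Bool.and_eq_true, decide_eq_true_eq]
    tauto
  have hup := countRunB_up x j Lup (fila - 1) 0 fila hup_pw hup_mem (by ring)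
  -- down direction
  set Ldown := PySem.List.sorted (propias.filter (fun r => decide (fila + 1 ≤ r) && decide (r ≤ 8))) (fun x => x) false with hLdown
  have hdown_pw : Ldown.Pairwise (· < ·) := by
    apply pairwise_lt_of_le_nodup
    · exact PySem.List.sorted_pairwise ..
    · exact ((PySem.List.sorted_perm ..).nodup_iff).mpr (hnodup.filter _)
  have hdown_mem : ∀ r : Int, r ∈ Ldown ↔ (fila + 1 ≤ r ∧ r ≤ 8 ∧ (x, r) ∈ j) := by
    intro r
    rw [hLdown, PySem.List.mem_sorted, List.mem_filter, hprop, mem_propias]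
    simp only [Bool.and_eq_true, decide_eq_true_eq]
    tauto
  have hdown := countRunB_down x j Ldown (fila + 1) 0 fila hdown_pw hdown_mem (by ring)
  rw [loopSupA_eq x j m (fila - 1) 0 (Or.inl rfl), loopInfA_eq x j m (fila + 1) 0 (Or.inl rfl)]
  rw [hup, hdown]
  simp only [zero_add, ocupadaA, ocupadaB]
  have hbu : fila + (-1 : Int) * (runUp x (fila - 1) j + 1) = (fila - 1) - runUp x (fila - 1) j := by ring
  have hbd : fila + (1 : Int) * (runDown x (fila + 1) j + 1) = (fila + 1) + runDown x (fila + 1) j := by ring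
  rw [hbu, hbd]
  have h1 := runUp_nonneg x (fila - 1) j
  have h2 := runDown_nonneg x (fila + 1) j
  generalize (decide ((x, fila - 1 - runUp x (fila - 1) j) ∈ j) || decide ((x, fila - 1 - runUp x (fila - 1) j) ∈ m)) = bu
  generalize (decide ((x, fila + 1 + runDown x (fila + 1) j) ∈ j) || decide ((x, fila + 1 + runDown x (fila + 1) j) ∈ m)) = bd
  cases bu <;> cases bd <;> (simp; try omega)
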